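-- pv_equiv track=rewrite | github.com/folkertvanheusden/DotXT | tests/flags.py | flags_rcl
-- ===== SOURCE A (Python) =====
-- def flags_rcl(val: int, count: int, carry: int, width: int, set_flag_o: bool):
--     check_bit = 32768 if width == 16 else 128
--
--     for i in range(0, count):
--         b7 = True if val & check_bit else False
--         val <<= 1
--         val |= carry
--         carry = b7
--         val &= 0xff if width == 8 else 65535
--
--     flag_o = False
--     mask = ~0
--
--     if set_flag_o:
--         flag_o = carry ^ (True if val & check_bit else False)
--     else:
--         mask = ~2048
--
--     flags = (1 if carry else 0) + (2048 if flag_o else 0)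
--
--     return (val, flags, mask & 0xffff)
-- ===== SOURCE B (Python) =====
-- def flags_rcl(val: int, count: int, carry: int, width: int, set_flag_o: bool):
--     # RCL's (value, carry) state is eventually periodic in the step count
--     # (period 17 for width 16, else 9, after a warm-up of at most 10 steps),
--     # so reduce the count first and run a bounded recursion on the packed state.
--     hi = 32768 if width == 16 else 128
--     m = 256 if width == 8 else 65536
--     period = 17 if width == 16 else 9
--     n = count if count <= 10 else 10 + (count - 10) % period
--
--     def spin(v, c, k):
--         if k <= 0:
--             return v, c
--         return spin((v * 2 | c) % m, (v // hi) & 1, k - 1)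
--
--     v, c = spin(val, carry, n)
--     top = (v // hi) & 1
--     flags = (0 if c == 0 else 1) + (2048 if set_flag_o and c != top else 0)
--     return (v, flags, 65535 if set_flag_o else 63487)
-- ===== Notes on version B (the rewrite author's own statement) =====
-- stated objective: faster
-- what changed: A rotates step by step, count times, in a for-loop over a (val, carry) pair with shift/or/and; B reduces count modulo the rotation period (17 for width 16, else 9, after a warm-up of at most 10 steps) and runs a bounded tail recursion whose step uses arithmetic (mod/floordiv) instead of masking, so at most 27 steps are ever executed.
import Mathlib
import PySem

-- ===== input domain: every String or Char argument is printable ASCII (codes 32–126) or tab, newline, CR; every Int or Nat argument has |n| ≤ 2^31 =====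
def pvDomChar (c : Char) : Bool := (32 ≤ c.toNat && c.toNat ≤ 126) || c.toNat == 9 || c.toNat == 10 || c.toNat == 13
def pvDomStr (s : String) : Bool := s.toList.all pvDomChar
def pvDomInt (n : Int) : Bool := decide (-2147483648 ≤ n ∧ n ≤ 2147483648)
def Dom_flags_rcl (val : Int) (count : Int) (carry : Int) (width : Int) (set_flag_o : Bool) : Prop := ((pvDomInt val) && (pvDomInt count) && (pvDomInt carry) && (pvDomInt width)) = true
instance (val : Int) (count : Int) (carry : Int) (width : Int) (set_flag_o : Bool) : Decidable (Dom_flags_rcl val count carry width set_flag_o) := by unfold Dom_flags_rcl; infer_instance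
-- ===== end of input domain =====

-- B replaces A's O(count) rotate-left-through-carry for-loop by a bounded computation: the
-- (value, carry) state is eventually periodic in the step count (period 17 for width 16, else 9,
-- after a warm-up of at most 10 steps), so B reduces count modulo the period and runs a tail
-- recursion whose step uses arithmetic (mod / floordiv) instead of A's shift-and-mask.

-- ===== PORT A =====
-- Loop body of A.  Python's carry becomes a bool after the first pass; Python bools are the
-- ints 0/1 and are only used as ints downstream, so the state keeps carry as 0/1 : Int.
def pvStepA (check_bit vmask : Int) (s : Int × Int) : Int × Int :=
  -- b7 = True if val & check_bit else False
  let b7 : Int := if PySem.Int.band s.1 check_bit ≠ 0 then 1 else 0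
  -- val <<= 1; val |= carry; val &= (0xff if width == 8 else 65535); carry = b7
  (PySem.Int.band (PySem.Int.bor (s.1 <<< (1 : Nat)) s.2) vmask, b7)

def flags_rcl (val : Int) (count : Int) (carry : Int) (width : Int) (set_flag_o : Bool) : List Int :=
  let check_bit : Int := if width = 16 then 32768 else 128
  let s := (PySem.List.pyRange 0 count 1).foldl
    (fun s _ => pvStepA check_bit (if width = 8 then 255 else 65535) s) (val, carry)
  -- flag_o = False; if set_flag_o: flag_o = carry ^ (True if val & check_bit else False)
  let flag_o : Int := if set_flag_o then
      PySem.Int.bxor s.2 (if PySem.Int.band s.1 check_bit ≠ 0 then 1 else 0) else 0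
  -- mask = ~0; if not set_flag_o: mask = ~2048
  let mask : Int := if set_flag_o then Int.not 0 else Int.not 2048
  let flags : Int := (if s.2 ≠ 0 then 1 else 0) + (if flag_o ≠ 0 then 2048 else 0)
  [s.1, flags, PySem.Int.band mask 65535]

-- ===== PORT B =====
-- B's tail recursion `spin(v, c, k)`; its fuel k is `n` (an int that may be ≤ 0 in Python,
-- guarded by `if k <= 0`), so the port takes n.toNat.
def pvSpin (hi m : Int) (v c : Int) (k : Nat) : Int × Int :=
  match k with
  | 0 => (v, c)
  | Nat.succ j =>
      pvSpin hi m (PySem.Int.mod (PySem.Int.bor (v * 2) c) m)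
        (PySem.Int.band (PySem.Int.floordiv v hi) 1) j

def flags_rcl_alt (val : Int) (count : Int) (carry : Int) (width : Int) (set_flag_o : Bool) : List Int :=
  let hi : Int := if width = 16 then 32768 else 128
  let m : Int := if width = 8 then 256 else 65536
  let period : Int := if width = 16 then 17 else 9
  let n : Int := if count ≤ 10 then count else 10 + PySem.Int.mod (count - 10) period
  let s := pvSpin hi m val carry n.toNat
  let top : Int := PySem.Int.band (PySem.Int.floordiv s.1 hi) 1
  let flags : Int := (if s.2 = 0 then 0 else 1) +
    (if set_flag_o = true ∧ s.2 ≠ top then 2048 else 0)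
  [s.1, flags, if set_flag_o then 65535 else 63487]

-- ===== PRECONDITION & SPEC =====
def Spec_flags_rcl (val : Int) (count : Int) (carry : Int) (width : Int) (set_flag_o : Bool) (out : List Int) : Prop := out = flags_rcl_alt val count carry width set_flag_o
instance (val : Int) (count : Int) (carry : Int) (width : Int) (set_flag_o : Bool) (out : List Int) : Decidable (Spec_flags_rcl val count carry width set_flag_o out) := by unfold Spec_flags_rcl; infer_instance

-- ===== CLAIM (what is proved, stated in full; the proofs are below) =====
def Claim_equal_flags_rcl : Prop := ∀ (val : Int) (count : Int) (carry : Int) (width : Int) (set_flag_o : Bool), Dom_flags_rcl val count carry width set_flag_o → Spec_flags_rcl val count carry width set_flag_o (flags_rcl val count carry width set_flag_o)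

-- ===== LEMMAS AND PROOFS =====
-- Proof-side copy of the loop body (identical to pvStepA; all invariant lemmas are stated on it).
def pvStepB (check_bit vmask : Int) (s : Int × Int) : Int × Int :=
  let b : Int := if PySem.Int.band s.1 check_bit ≠ 0 then 1 else 0
  (PySem.Int.band (PySem.Int.bor (s.1 <<< (1 : Nat)) s.2) vmask, b)

lemma pvStepAB : pvStepA = pvStepB := rfl

lemma pvBandMask (w : Nat) (x : Int) : PySem.Int.band x (2 ^ w - 1) = x % 2 ^ w := by
  have hpow : ((2 ^ w : Nat) : Int) = 2 ^ w := by push_cast; ring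
  have hw : (1:Int) ≤ 2 ^ w := one_le_pow₀ (by norm_num)
  have h0 : ((2:Int) ^ w - 1).toNat = 2 ^ w - 1 := by omega
  rcases x with n | n
  · rw [show Int.ofNat n = (n:Int) from rfl,
      PySem.Int.band_of_nonneg (by positivity) (by omega), Int.toNat_natCast, h0,
      Nat.and_two_pow_sub_one_eq_mod]
    have hm : ((n % 2 ^ w : Nat) : Int) = (n:Int) % ((2 ^ w : Nat) : Int) := Int.natCast_mod _ _
    rw [hpow] at hm
    have h3 : n % 2 ^ w < 2 ^ w := Nat.mod_lt _ (by positivity)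
    omega
  · unfold PySem.Int.band
    rw [if_neg (by omega), if_pos (by omega), h0]
    have h2 : (-(Int.negSucc n) - 1).toNat = n := by omega
    rw [h2, Nat.land_comm, Nat.and_two_pow_sub_one_eq_mod]
    have h3 : n % 2 ^ w < 2 ^ w := Nat.mod_lt _ (by positivity)
    have hm : ((n % 2 ^ w : Nat) : Int) = (n:Int) % ((2 ^ w : Nat) : Int) := Int.natCast_mod _ _
    rw [hpow] at hm
    have hr0 : (0:Int) ≤ (n:Int) % 2 ^ w := Int.emod_nonneg _ (by omega)
    have hr1 : (n:Int) % 2 ^ w < 2 ^ w := Int.emod_lt_of_pos _ (by omega)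
    have hd := Int.emod_add_ediv (n:Int) (2 ^ w)
    have key : Int.negSucc n = (2 ^ w - 1 - (n:Int) % 2 ^ w) + 2 ^ w * (-((n:Int)/2^w) - 1) := by
      have h4 : Int.negSucc n = -(n:Int) - 1 := by omega
      linear_combination h4 + hd
    have hcast : ((2 ^ w - 1 - n % 2 ^ w : Nat) : Int) = 2 ^ w - 1 - (n:Int) % 2 ^ w := by omega
    rw [hcast, key, Int.add_mul_emod_self_left]
    exact (Int.emod_eq_of_lt (by omega) (by omega)).symm

lemma pvBandBitNat (q : Nat) (x : Int) (hx : 0 ≤ x) :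
    (PySem.Int.band x (2 ^ q) ≠ 0) ↔ (x / 2 ^ q) % 2 = 1 := by
  obtain ⟨n, rfl⟩ := Int.eq_ofNat_of_zero_le hx
  rw [show ((2:Int) ^ q) = ((2 ^ q : Nat) : Int) by push_cast; ring,
    PySem.Int.band_natCast, ← Int.natCast_ediv]
  have h : n &&& 2 ^ q = (n.testBit q).toNat * 2 ^ q := Nat.and_two_pow _ q
  rw [Nat.testBit_eq_decide_div_mod_eq] at h
  have hq : 0 < 2 ^ q := Nat.two_pow_pos q
  by_cases hb : n / 2 ^ q % 2 = 1 <;> simp [hb] at h <;> constructor <;> intro h2 <;> omega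

-- Bit extraction for every integer (Python's infinite two's complement).
lemma pvBandBit (q : Nat) (x : Int) :
    (PySem.Int.band x (2 ^ q) ≠ 0) ↔ (x / 2 ^ q) % 2 = 1 := by
  rcases x with n | n
  · exact pvBandBitNat q _ (Int.ofNat_nonneg n)
  · have hq : (0:Int) < 2 ^ q := by positivity
    have hL : PySem.Int.band (Int.negSucc n) (2 ^ q)
        = ((2 ^ q - (2 ^ q &&& n) : Nat) : Int) := by
      unfold PySem.Int.band
      rw [if_neg (by omega), if_pos (by omega),
        show (-Int.negSucc n - 1).toNat = n from by omega,
        show ((2:Int) ^ q).toNat = 2 ^ q from by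
          rw [show ((2:Int) ^ q) = ((2 ^ q : Nat) : Int) from by push_cast; ring,
            Int.toNat_natCast]]
    have hbit : 2 ^ q &&& n = (n.testBit q).toNat * 2 ^ q := by
      rw [Nat.land_comm]; exact Nat.and_two_pow _ q
    rw [Nat.testBit_eq_decide_div_mod_eq] at hbit
    -- the Int quotient: Int.negSucc n / 2^q = -(n/2^q) - 1
    have hd := Int.emod_add_ediv (n:Int) (2 ^ q)
    have hr0 : (0:Int) ≤ (n:Int) % 2 ^ q := Int.emod_nonneg _ (by omega)
    have hr1 : (n:Int) % 2 ^ q < 2 ^ q := Int.emod_lt_of_pos _ hq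
    have hqu : Int.negSucc n / 2 ^ q = -((n:Int) / 2 ^ q) - 1 := by
      have key : Int.negSucc n = (2 ^ q - (n:Int) % 2 ^ q - 1) + (-((n:Int) / 2 ^ q) - 1) * 2 ^ q := by
        have h4 : Int.negSucc n = -(n:Int) - 1 := by omega
        linear_combination h4 + hd
      rw [key, Int.add_mul_ediv_right _ _ (by omega : (2:Int) ^ q ≠ 0),
        Int.ediv_eq_zero_of_lt (by omega) (by omega)]
      ring
    rw [hL, hqu]
    have hnd : ((n / 2 ^ q : Nat) : Int) = (n:Int) / 2 ^ q := by
      rw [Int.natCast_ediv]; push_cast; ring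
    have hq2 : 0 < 2 ^ q := Nat.two_pow_pos q
    by_cases hb : n / 2 ^ q % 2 = 1 <;> simp [hb] at hbit <;> constructor <;> intro h2 <;> omega

-- A's bit test as B computes it: (x // 2^q) & 1.
lemma pvBitEq (q : Nat) (x : Int) :
    PySem.Int.band (PySem.Int.floordiv x (2 ^ q)) 1
      = if PySem.Int.band x (2 ^ q) ≠ 0 then 1 else 0 := by
  rw [PySem.Int.band_one, PySem.Int.floordiv_eq_ediv_of_pos (by positivity),
    PySem.Int.mod_eq_emod_of_pos (by norm_num)]
  have h2 := Int.emod_two_eq (x / 2 ^ q)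
  by_cases hb : PySem.Int.band x (2 ^ q) ≠ 0
  · rw [if_pos hb]; exact (pvBandBit q x).mp hb
  · rw [if_neg hb]
    have := (pvBandBit q x).not.mp hb
    omega

lemma pvShiftAll (x : Int) : x <<< (1 : Nat) = 2 * x := by
  rw [Int.shiftLeft_eq]; ring

-- One spin step of B equals one loop step of A.
lemma pvStepEq (q w : Nat) (v c : Int) :
    (PySem.Int.mod (PySem.Int.bor (v * 2) c) (2 ^ w),
     PySem.Int.band (PySem.Int.floordiv v (2 ^ q)) 1)
      = pvStepA (2 ^ q) ((2:Int) ^ w - 1) (v, c) := by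
  unfold pvStepA
  dsimp only
  rw [pvBitEq q v, pvShiftAll, pvBandMask w,
    PySem.Int.mod_eq_emod_of_pos (by positivity), mul_comm v 2]

lemma pvSpinIter (q w : Nat) (k : Nat) (v c : Int) :
    pvSpin (2 ^ q) (2 ^ w) v c k = (pvStepA (2 ^ q) ((2:Int) ^ w - 1))^[k] (v, c) := by
  induction k generalizing v c with
  | zero => rfl
  | succ j ih =>
    rw [pvSpin, ih, Function.iterate_succ_apply, ← pvStepEq q w v c]

-- Python's `x ^ t != 0` is `x ≠ t` when t is 0 or 1 (xor is zero exactly on equal arguments).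
lemma pvXorNe (x t : Int) (ht : t = 0 ∨ t = 1) : (PySem.Int.bxor x t ≠ 0) ↔ x ≠ t := by
  rcases ht with h | h <;> subst h
  · simp
  · rcases x with n | n
    · rw [show Int.ofNat n = ((n : Nat) : Int) from rfl,
        show (1:Int) = ((1 : Nat) : Int) from rfl, PySem.Int.bxor_natCast]
      simp [Nat.xor_eq_zero_iff]
    · constructor <;> intro _
      · omega
      · unfold PySem.Int.bxor
        rw [if_neg (by omega), if_pos (by omega)]
        have := Int.natCast_nonneg ((-Int.negSucc n - 1).toNat ^^^ (1:Int).toNat)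
        omega

lemma pvShift (x : Int) (hx : 0 ≤ x) : (x <<< (1 : Nat)) = 2 * x := pvShiftAll x

lemma pvBorBit (x c : Int) (hx : 0 ≤ x) (hc : 0 ≤ c) (hc1 : c ≤ 1) :
    PySem.Int.bor (2 * x) c = 2 * x + c := by
  rcases (by omega : c = 0 ∨ c = 1) with h | h <;> subst h
  · simp
  · rw [PySem.Int.bor_of_nonneg (by omega) (by norm_num)]
    have h2 : (2*x).toNat = 2 * x.toNat := by omega
    have h3 : (2 * x.toNat) ||| 1 = 2 * x.toNat + 1 := by
      apply Nat.eq_of_testBit_eq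
      intro i
      cases i with
      | zero => simp [Nat.mul_comm]
      | succ j =>
        rw [Nat.testBit_lor]
        have hh : (x.toNat * 2 + 1) / 2 = x.toNat := by omega
        simp [Nat.testBit_succ, Nat.mul_comm, hh]
    rw [h2, show ((1:Int)).toNat = 1 from rfl, h3]
    omega

def pvN (B : Int) (s : Int × Int) : Prop := 0 ≤ s.1 ∧ s.1 < B ∧ 0 ≤ s.2 ∧ s.2 ≤ 1

lemma pvStepNorm (q w : Nat) (s : Int × Int) :
    pvN (2 ^ w) (pvStepB (2 ^ q) (2 ^ w - 1) s) := by
  have h1 := pvBandMask w (PySem.Int.bor (s.1 <<< (1 : Nat)) s.2)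
  have h2 : (0:Int) < 2 ^ w := by positivity
  have h3 : 0 ≤ PySem.Int.bor (s.1 <<< (1 : Nat)) s.2 % 2 ^ w :=
    Int.emod_nonneg _ (by omega)
  have h4 : PySem.Int.bor (s.1 <<< (1 : Nat)) s.2 % 2 ^ w < 2 ^ w :=
    Int.emod_lt_of_pos _ h2
  unfold pvStepB pvN
  dsimp only
  refine ⟨?_, ?_, ?_, ?_⟩
  · rw [h1]; exact h3
  · rw [h1]; exact h4
  · split <;> omega
  · split <;> omega

lemma pvStepArith (q w : Nat) (s : Int × Int) (h : pvN (2 ^ w) s) :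
    pvStepB (2 ^ q) (2 ^ w - 1) s = ((2 * s.1 + s.2) % 2 ^ w, (s.1 / 2 ^ q) % 2) := by
  obtain ⟨h1, h2, h3, h4⟩ := h
  unfold pvStepB
  have e1 : s.1 <<< (1 : Nat) = 2 * s.1 := pvShift _ h1
  have e2 := pvBorBit s.1 s.2 h1 h3 h4
  have e3 := pvBandMask w (2 * s.1 + s.2)
  have e4 := pvBandBit q s.1
  ext
  · simp [e1, e2, e3]
  · dsimp only
    split
    · rename_i hb
      rw [e4] at hb
      omega
    · rename_i hb
      rw [e4] at hb
      have : (0:Int) ≤ s.1 / 2 ^ q := Int.ediv_nonneg h1 (by positivity)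
      omega

def pvE (B : Int) (s : Int × Int) : Int := s.2 * B + s.1

lemma pvEBounds (B : Int) (hB : 0 < B) (s : Int × Int) (h : pvN B s) :
    0 ≤ pvE B s ∧ pvE B s ≤ 2 * B - 1 := by
  obtain ⟨h1, h2, h3, h4⟩ := h
  have e0 : 0 ≤ s.2 * B := mul_nonneg h3 hB.le
  have e1 : s.2 * B ≤ 1 * B := mul_le_mul_of_nonneg_right h4 hB.le
  rw [one_mul] at e1
  unfold pvE
  constructor <;> linarith

lemma pvRotIter (g : Int × Int → Int × Int) (B M : Int)
    (hnorm : ∀ s, pvN B s → pvN B (g s))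
    (hmod : ∀ s, pvN B s → pvE B (g s) ≡ 2 * pvE B s [ZMOD M])
    (hone : ∀ s, pvN B s → (pvE B (g s) = M ↔ pvE B s = M)) :
    ∀ (k : Nat) (s : Int × Int), pvN B s →
      pvN B (g^[k] s) ∧ pvE B (g^[k] s) ≡ 2 ^ k * pvE B s [ZMOD M] ∧
      (pvE B (g^[k] s) = M ↔ pvE B s = M) := by
  intro k
  induction k with
  | zero =>
    intro s hs
    refine ⟨hs, ?_, Iff.rfl⟩
    simp
  | succ k ih =>
    intro s hs
    obtain ⟨hn, hm, ho⟩ := ih s hs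
    rw [Function.iterate_succ_apply']
    refine ⟨hnorm _ hn, ?_, (hone _ hn).trans ho⟩
    calc pvE B (g (g^[k] s)) ≡ 2 * pvE B (g^[k] s) [ZMOD M] := hmod _ hn
      _ ≡ 2 * (2 ^ k * pvE B s) [ZMOD M] := hm.mul_left 2
      _ = 2 ^ (k+1) * pvE B s := by ring

lemma pvRotPeriod (g : Int × Int → Int × Int) (B M : Int) (p : Nat) (hB : 0 < B)
    (hM : M = 2 * B - 1) (hp : (2 : Int) ^ p ≡ 1 [ZMOD M])
    (hnorm : ∀ s, pvN B s → pvN B (g s))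
    (hmod : ∀ s, pvN B s → pvE B (g s) ≡ 2 * pvE B s [ZMOD M])
    (hone : ∀ s, pvN B s → (pvE B (g s) = M ↔ pvE B s = M)) :
    ∀ s, pvN B s → g^[p] s = s := by
  intro s hs
  obtain ⟨hn, hm, ho⟩ := pvRotIter g B M hnorm hmod hone p s hs
  have hme : pvE B (g^[p] s) ≡ pvE B s [ZMOD M] :=
    hm.trans (by simpa using hp.mul_right (pvE B s))
  have hb1 := pvEBounds B hB s hs
  have hb2 := pvEBounds B hB _ hn
  have hEeq : pvE B (g^[p] s) = pvE B s := by
    by_cases hcM : pvE B s = M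
    · rw [ho.mpr hcM, hcM]
    have hM' : pvE B (g^[p] s) ≠ M := fun hh => hcM (ho.mp hh)
    have := hme
    unfold Int.ModEq at this
    rw [Int.emod_eq_of_lt (by omega) (by omega),
      Int.emod_eq_of_lt (by omega) (by omega)] at this
    exact this
  obtain ⟨h1, h2, h3, h4⟩ := hs
  obtain ⟨g1, g2, g3, g4⟩ := hn
  have hcomp : (g^[p] s).2 = s.2 ∧ (g^[p] s).1 = s.1 := by
    unfold pvE at hEeq
    rcases (by omega : s.2 = 0 ∨ s.2 = 1) with h | h <;>
      rcases (by omega : (g^[p] s).2 = 0 ∨ (g^[p] s).2 = 1) with h' | h' <;>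
        rw [h, h'] at hEeq <;> rw [h, h'] <;> simp at hEeq ⊢ <;> omega
  exact Prod.ext hcomp.2 hcomp.1

lemma pvStep16 : pvStepB 32768 65535 = pvStepB (2 ^ 15) ((2:Int) ^ 16 - 1) := by norm_num
lemma pvStep8 : pvStepB 128 255 = pvStepB (2 ^ 7) ((2:Int) ^ 8 - 1) := by norm_num
lemma pvStepW : pvStepB 128 65535 = pvStepB (2 ^ 7) ((2:Int) ^ 16 - 1) := by norm_num

lemma pvHe (q w : Nat) (M : Int) (hq : w = q + 1) (hM : M = 2 ^ (w+1) - 1)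
    (s : Int × Int) (hs : pvN (2 ^ w) s) :
    pvE (2 ^ w) (pvStepB (2 ^ q) ((2:Int) ^ w - 1) s) = 2 * pvE (2 ^ w) s - M * s.2 := by
  rw [pvStepArith q w s hs]
  obtain ⟨h1, h2, h3, h4⟩ := hs
  subst hq hM
  unfold pvE
  dsimp only
  have ht : s.1 / 2 ^ q < 2 := by
    apply Int.ediv_lt_of_lt_mul (by positivity)
    rw [pow_succ] at h2
    linarith
  have ht0 : 0 ≤ s.1 / 2 ^ q := Int.ediv_nonneg h1 (by positivity)
  have htm : s.1 / 2 ^ q % 2 = s.1 / 2 ^ q := Int.emod_eq_of_lt ht0 ht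
  rw [htm]
  have hd := Int.emod_add_mul_ediv s.1 (2 ^ q)
  have h2' : (2:Int) ^ (q+1) = 2 ^ q * 2 := by ring
  have hmod0 : 0 ≤ s.1 % 2 ^ q := Int.emod_nonneg _ (by positivity)
  have hmod1 : s.1 % 2 ^ q < 2 ^ q := Int.emod_lt_of_pos _ (by positivity)
  have hsplit : (2 * s.1 + s.2) % 2 ^ (q+1) = 2 * s.1 + s.2 - 2 ^ (q+1) * (s.1 / 2 ^ q) := by
    have : 2 * s.1 + s.2 = (2 * (s.1 % 2 ^ q) + s.2) + 2 ^ (q+1) * (s.1 / 2 ^ q) := by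
      rw [h2']
      linear_combination 2 * hd.symm
    rw [this, Int.add_mul_emod_self_left,
      Int.emod_eq_of_lt (by linarith) (by rw [h2']; linarith)]
    ring
  rw [hsplit, h2']
  ring

lemma pvPureArgs (q w : Nat) (M : Int) (hq : w = q + 1) (hM : M = 2 ^ (w+1) - 1) :
    (∀ s, pvN (2 ^ w) s → pvE (2 ^ w) (pvStepB (2 ^ q) ((2:Int) ^ w - 1) s)
        ≡ 2 * pvE (2 ^ w) s [ZMOD M]) ∧
    (∀ s, pvN (2 ^ w) s → (pvE (2 ^ w) (pvStepB (2 ^ q) ((2:Int) ^ w - 1) s) = M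
        ↔ pvE (2 ^ w) s = M)) := by
  have hB : (0:Int) < 2 ^ w := by positivity
  constructor
  · intro s hs
    rw [pvHe q w M hq hM s hs]
    unfold Int.ModEq
    exact Int.sub_mul_emod_self_left _ _ _
  · intro s hs
    have he := pvHe q w M hq hM s hs
    have hb1 := pvEBounds _ hB s hs
    have hb2 := pvEBounds _ hB _ (pvStepNorm q w s)
    obtain ⟨h1, h2, h3, h4⟩ := hs
    have hMv : M = 2 * 2 ^ w - 1 := by rw [hM]; ring
    rcases (by omega : s.2 = 0 ∨ s.2 = 1) with h | h <;> rw [h] at he <;>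
      constructor <;> intro hh <;>
      [skip; skip; skip; skip] <;> omega

lemma pvPure16 : ∀ s, pvN 65536 s → (pvStepB 32768 65535)^[17] s = s := by
  rw [pvStep16]
  have hargs := pvPureArgs 15 16 131071 rfl (by norm_num)
  have hnorm : ∀ s, pvN ((2:Int) ^ 16) s → pvN ((2:Int) ^ 16) (pvStepB (2 ^ 15) ((2:Int) ^ 16 - 1) s) :=
    fun s _ => pvStepNorm 15 16 s
  have := pvRotPeriod (pvStepB (2 ^ 15) ((2:Int) ^ 16 - 1)) (2 ^ 16) 131071 17
    (by positivity) (by norm_num) (by decide) hnorm hargs.1 hargs.2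
  intro s hs
  exact this s (by norm_num at hs ⊢; exact hs)

lemma pvPure8 : ∀ s, pvN 256 s → (pvStepB 128 255)^[9] s = s := by
  rw [pvStep8]
  have hargs := pvPureArgs 7 8 511 rfl (by norm_num)
  have hnorm : ∀ s, pvN ((2:Int) ^ 8) s → pvN ((2:Int) ^ 8) (pvStepB (2 ^ 7) ((2:Int) ^ 8 - 1) s) :=
    fun s _ => pvStepNorm 7 8 s
  have := pvRotPeriod (pvStepB (2 ^ 7) ((2:Int) ^ 8 - 1)) (2 ^ 8) 511 9
    (by positivity) (by norm_num) (by decide) hnorm hargs.1 hargs.2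
  intro s hs
  exact this s (by norm_num at hs ⊢; exact hs)

lemma pvWRotor (s : Int × Int) (h : pvN 65536 s) :
    ((pvStepB 128 65535 s).1 % 256, (pvStepB 128 65535 s).2)
      = pvStepB 128 255 ((s.1 % 256, s.2)) ∧ pvN 65536 (pvStepB 128 65535 s) := by
  have hW : pvN ((2:Int)^16) s := by norm_num at h ⊢; exact h
  have h8 : pvN ((2:Int)^8) ((s.1 % 256, s.2)) := by
    obtain ⟨h1, h2, h3, h4⟩ := h
    refine ⟨Int.emod_nonneg _ (by norm_num), ?_, h3, h4⟩
    norm_num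
    exact Int.emod_lt_of_pos _ (by norm_num)
  rw [pvStepW, pvStepArith 7 16 s hW, pvStep8, pvStepArith 7 8 _ h8]
  obtain ⟨h1, h2, h3, h4⟩ := h
  refine ⟨?_, ?_⟩
  · norm_num
    constructor <;> omega
  · have := pvStepNorm 7 16 s
    rw [pvStepArith 7 16 s hW] at this
    norm_num at this ⊢
    exact this

lemma pvWForget :
    ∀ (j : Nat), j ≤ 8 → ∀ (a b : Int × Int), pvN 65536 a → pvN 65536 b →
      a.1 % 256 = b.1 % 256 → a.2 = b.2 →
      ((pvStepB 128 65535)^[j] a).1 ≡ ((pvStepB 128 65535)^[j] b).1 [ZMOD 2 ^ (8 + j)] ∧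
      ((pvStepB 128 65535)^[j] a).1 % 256 = ((pvStepB 128 65535)^[j] b).1 % 256 ∧
      ((pvStepB 128 65535)^[j] a).2 = ((pvStepB 128 65535)^[j] b).2 ∧
      pvN 65536 ((pvStepB 128 65535)^[j] a) ∧ pvN 65536 ((pvStepB 128 65535)^[j] b) := by
  intro j
  induction j with
  | zero =>
    intro _ a b ha hb hl hc
    refine ⟨?_, hl, hc, ha, hb⟩
    show a.1 % 2 ^ 8 = b.1 % 2 ^ 8
    norm_num
    omega
  | succ j ih =>
    intro hj a b ha hb hl hc
    obtain ⟨hm, hl', hc', hna, hnb⟩ := ih (by omega) a b ha hb hl hc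
    set A := (pvStepB 128 65535)^[j] a with hA
    set B := (pvStepB 128 65535)^[j] b with hB
    have hWa : pvN ((2:Int)^16) A := by norm_num at hna ⊢; exact hna
    have hWb : pvN ((2:Int)^16) B := by norm_num at hnb ⊢; exact hnb
    have hdvd : ((2:Int) ^ (9 + j)) ∣ 65536 := by
      rw [show (65536:Int) = 2 ^ 16 by norm_num]
      exact pow_dvd_pow 2 (by omega)
    have hm2 : 2 * A.1 + A.2 ≡ 2 * B.1 + B.2 [ZMOD 2 ^ (9 + j)] := by
      have := hm.mul_left' (c := 2)
      rw [show (2:Int) * 2 ^ (8 + j) = 2 ^ (9 + j) by ring] at this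
      simpa [hc'] using this.add_right A.2
    rw [Function.iterate_succ_apply', Function.iterate_succ_apply', ← hA, ← hB,
      pvStepW, pvStepArith 7 16 A hWa, pvStepArith 7 16 B hWb]
    refine ⟨?_, ?_, ?_, ?_, ?_⟩
    · show (2 * A.1 + A.2) % 2 ^ 16 % _ = (2 * B.1 + B.2) % 2 ^ 16 % _
      rw [show (8 + (j+1)) = 9 + j from by omega,
        show ((2:Int) ^ 16) = 65536 by norm_num,
        Int.emod_emod_of_dvd _ hdvd, Int.emod_emod_of_dvd _ hdvd]
      exact hm2
    · norm_num
      omega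
    · norm_num
      omega
    · have := pvStepNorm 7 16 A
      rw [pvStepArith 7 16 A hWa] at this
      exact (by norm_num at this ⊢; exact this)
    · have := pvStepNorm 7 16 B
      rw [pvStepArith 7 16 B hWb] at this
      exact (by norm_num at this ⊢; exact this)

lemma pvWeird : ∀ s, pvN 65536 s →
    (pvStepB 128 65535)^[17] s = (pvStepB 128 65535)^[8] s := by
  intro s hs
  have hrot : ∀ k : Nat, ((pvStepB 128 65535)^[k] s).1 % 256
      = ((pvStepB 128 255)^[k] ((s.1 % 256, s.2))).1 ∧
      ((pvStepB 128 65535)^[k] s).2 = ((pvStepB 128 255)^[k] ((s.1 % 256, s.2))).2 ∧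
      pvN 65536 ((pvStepB 128 65535)^[k] s) := by
    intro k
    induction k with
    | zero => exact ⟨rfl, rfl, hs⟩
    | succ k ihk =>
      obtain ⟨ih1, ih2, ih3⟩ := ihk
      have := pvWRotor _ ih3
      rw [Function.iterate_succ_apply', Function.iterate_succ_apply']
      have heq : ((((pvStepB 128 65535)^[k] s).1 % 256, ((pvStepB 128 65535)^[k] s).2))
          = (pvStepB 128 255)^[k] ((s.1 % 256, s.2)) := Prod.ext ih1 ih2
      rw [heq] at this
      refine ⟨?_, ?_, this.2⟩
      · simpa using congrArg Prod.fst this.1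
      · simpa using congrArg Prod.snd this.1
  have h8r : pvN 256 ((s.1 % 256, s.2)) := by
    obtain ⟨h1, h2, h3, h4⟩ := hs
    exact ⟨Int.emod_nonneg _ (by norm_num), Int.emod_lt_of_pos _ (by norm_num), h3, h4⟩
  have h9 := hrot 9
  rw [pvPure8 _ h8r] at h9
  have hfor := pvWForget 8 le_rfl ((pvStepB 128 65535)^[9] s) s h9.2.2 hs
    (by rw [h9.1]) (by rw [h9.2.1])
  have h17 : (pvStepB 128 65535)^[17] s = (pvStepB 128 65535)^[8] ((pvStepB 128 65535)^[9] s) := by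
    rw [← Function.iterate_add_apply]
  rw [h17]
  obtain ⟨hm, _, hc, hn1, hn2⟩ := hfor
  have hb1 := hn1
  have hb2 := hn2
  obtain ⟨a1, a2, _, _⟩ := hb1
  obtain ⟨b1, b2, _, _⟩ := hb2
  apply Prod.ext _ hc
  rw [show ((2:Int))^(8+8) = 65536 from by norm_num] at hm
  have h' : ((pvStepB 128 65535)^[8] ((pvStepB 128 65535)^[9] s)).1 % 65536
      = ((pvStepB 128 65535)^[8] s).1 % 65536 := hm
  omega

lemma pvNorm16 (s : Int × Int) : pvN 65536 (pvStepB 32768 65535 s) := by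
  have := pvStepNorm 15 16 s
  norm_num at this ⊢
  exact this

lemma pvNorm8 (s : Int × Int) : pvN 256 (pvStepB 128 255 s) := by
  have := pvStepNorm 7 8 s
  norm_num at this ⊢
  exact this

lemma pvNormW (s : Int × Int) : pvN 65536 (pvStepB 128 65535 s) := by
  have := pvStepNorm 7 16 s
  norm_num at this ⊢
  exact this

lemma pvPer16 (s : Int × Int) (k : Nat) (hk : 1 ≤ k) :
    (pvStepB 32768 65535)^[k + 17] s = (pvStepB 32768 65535)^[k] s := by
  obtain ⟨m, rfl⟩ : ∃ m, k = m + 1 := ⟨k - 1, by omega⟩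
  rw [show m + 1 + 17 = (m + 17) + 1 from by omega,
    Function.iterate_succ_apply, Function.iterate_add_apply,
    pvPure16 _ (pvNorm16 s), ← Function.iterate_succ_apply]

lemma pvPer8 (s : Int × Int) (k : Nat) (hk : 1 ≤ k) :
    (pvStepB 128 255)^[k + 9] s = (pvStepB 128 255)^[k] s := by
  obtain ⟨m, rfl⟩ : ∃ m, k = m + 1 := ⟨k - 1, by omega⟩
  rw [show m + 1 + 9 = (m + 9) + 1 from by omega,
    Function.iterate_succ_apply, Function.iterate_add_apply,
    pvPure8 _ (pvNorm8 s), ← Function.iterate_succ_apply]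

lemma pvPerW (s : Int × Int) (k : Nat) (hk : 9 ≤ k) :
    (pvStepB 128 65535)^[k + 9] s = (pvStepB 128 65535)^[k] s := by
  obtain ⟨m, rfl⟩ : ∃ m, k = m + 9 := ⟨k - 9, by omega⟩
  calc (pvStepB 128 65535)^[m + 9 + 9] s
      = (pvStepB 128 65535)^[m + 17 + 1] s := by rw [show m + 9 + 9 = m + 17 + 1 from by omega]
    _ = (pvStepB 128 65535)^[m] ((pvStepB 128 65535)^[17] (pvStepB 128 65535 s)) := by
        rw [Function.iterate_add_apply, Function.iterate_add_apply, Function.iterate_one]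
    _ = (pvStepB 128 65535)^[m] ((pvStepB 128 65535)^[8] (pvStepB 128 65535 s)) := by
        rw [pvWeird _ (pvNormW s)]
    _ = (pvStepB 128 65535)^[m + 8 + 1] s := by
        rw [Function.iterate_add_apply, Function.iterate_add_apply, Function.iterate_one]
    _ = (pvStepB 128 65535)^[m + 9] s := by rw [show m + 8 + 1 = m + 9 from by omega]

lemma pvReduce {α : Type} (f : α → α) (P : Nat) (hP : 0 < P) (s : α)
    (hper : ∀ k, 9 ≤ k → f^[k + P] s = f^[k] s) :
    ∀ N, f^[N] s = f^[if N ≤ 10 then N else 10 + (N - 10) % P] s := by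
  intro N
  induction N using Nat.strong_induction_on with
  | _ N ih =>
    by_cases h1 : N ≤ 10
    · rw [if_pos h1]
    rw [if_neg h1]
    by_cases h2 : N - 10 < P
    · rw [Nat.mod_eq_of_lt h2]
      congr 1
      omega
    · have hstep : f^[N] s = f^[N - P] s := by
        conv_lhs => rw [show N = (N - P) + P from by omega]
        exact hper _ (by omega)
      rw [hstep, ih (N - P) (by omega)]
      by_cases h3 : N - P ≤ 10
      · rw [if_pos h3, show N - P = 10 from by omega,
          show N - 10 = P from by omega, Nat.mod_self]
      · rw [if_neg h3, Nat.mod_eq_sub_mod (by omega : P ≤ N - 10),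
          show N - 10 - P = N - P - 10 from by omega]

lemma pvRangeLen (count : Int) : (PySem.List.pyRange 0 count 1).length = count.toNat := by
  simp [pysem]

lemma pvFoldConst {α β : Type} (f : α → α) (l : List β) (init : α) :
    l.foldl (fun s _ => f s) init = f^[l.length] init := by
  induction l generalizing init with
  | nil => rfl
  | cons x t ih => simpa [Function.iterate_succ_apply] using ih (f init)

lemma pvLoopEq (cb vm : Int) (P : Nat) (hP : 0 < P)
    (hper : ∀ (s : Int × Int) (k : Nat), 9 ≤ k → (pvStepB cb vm)^[k + P] s = (pvStepB cb vm)^[k] s)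
    (count : Int) (S : Int × Int) :
    (pvStepB cb vm)^[count.toNat] S
      = (pvStepB cb vm)^[(if count ≤ 10 then count
          else 10 + PySem.Int.mod (count - 10) (P : Int)).toNat] S := by
  rw [pvReduce _ P hP S (fun k hk => hper S k hk) count.toNat]
  congr 1
  by_cases hc : count ≤ 10
  · rw [if_pos hc, if_pos (by omega)]
  · rw [if_neg hc, if_neg (by omega),
      PySem.Int.mod_eq_emod_of_pos (by exact_mod_cast hP),
      show count - 10 = ((count.toNat - 10 : Nat) : Int) from by omega,
      ← Int.natCast_mod]
    omega

-- The two tails (flags and mask computations) agree on any common loop state.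
lemma pvTail (q : Nat) (cb : Int) (hcb : cb = 2 ^ q) (s : Int × Int) (set_flag_o : Bool) :
    (if s.2 ≠ 0 then (1:Int) else 0) +
      (if (if set_flag_o then
            PySem.Int.bxor s.2 (if PySem.Int.band s.1 cb ≠ 0 then 1 else 0) else 0) ≠ 0
        then 2048 else 0)
      = (if s.2 = 0 then 0 else 1) +
        (if set_flag_o = true ∧ s.2 ≠ PySem.Int.band (PySem.Int.floordiv s.1 cb) 1
          then 2048 else 0) := by
  subst hcb
  rw [pvBitEq q s.1]
  have h1 : (if s.2 ≠ 0 then (1:Int) else 0) = (if s.2 = 0 then 0 else 1) := by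
    by_cases h : s.2 = 0 <;> simp [h]
  rw [h1]
  congr 1
  set t : Int := if PySem.Int.band s.1 (2 ^ q) ≠ 0 then 1 else 0 with htdef
  have ht : t = 0 ∨ t = 1 := by rw [htdef]; split <;> simp
  have hx := pvXorNe s.2 t ht
  cases set_flag_o
  · simp
  · simp only [if_true, true_and]
    by_cases hb : s.2 = t
    · rw [if_neg (by simpa using fun hh => (hx.mp hh) hb), if_neg (by simp [hb])]
    · rw [if_pos (hx.mpr hb), if_pos hb]

theorem pvSpec (val : Int) (count : Int) (carry : Int) (width : Int) (set_flag_o : Bool) :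
    flags_rcl val count carry width set_flag_o = flags_rcl_alt val count carry width set_flag_o := by
  have hmask : ∀ b : Bool, PySem.Int.band (if b then Int.not 0 else Int.not 2048) 65535
      = if b then (65535:Int) else 63487 := by
    intro b; cases b <;> decide
  by_cases h16 : width = 16
  · subst h16
    simp only [flags_rcl, flags_rcl_alt, show ((16:Int) = 8) = False from by norm_num, if_true, if_false, pvFoldConst, pvRangeLen]
    rw [show (32768:Int) = 2^15 from by norm_num, show (65536:Int) = 2^16 from by norm_num,
      pvSpinIter 15 16, show ((2:Int)^16 - 1) = 65535 from by norm_num,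
      show ((2:Int)^15) = 32768 from by norm_num, pvStepAB]
    have hs := pvLoopEq 32768 65535 17 (by norm_num) (fun s k hk => pvPer16 s k (by omega))
      count (val, carry)
    push_cast at hs
    rw [← hs, hmask set_flag_o,
      pvTail 15 32768 (by norm_num) ((pvStepB 32768 65535)^[count.toNat] (val, carry)) set_flag_o]
  · by_cases h8 : width = 8
    · subst h8
      simp only [flags_rcl, flags_rcl_alt, show ((8:Int) = 16) = False from by norm_num, if_true, if_false, pvFoldConst, pvRangeLen]
      rw [show (128:Int) = 2^7 from by norm_num, show (256:Int) = 2^8 from by norm_num,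
        pvSpinIter 7 8, show ((2:Int)^8 - 1) = 255 from by norm_num,
        show ((2:Int)^7) = 128 from by norm_num, pvStepAB]
      have hs := pvLoopEq 128 255 9 (by norm_num) (fun s k hk => pvPer8 s k (by omega))
        count (val, carry)
      push_cast at hs
      rw [← hs, hmask set_flag_o,
        pvTail 7 128 (by norm_num) ((pvStepB 128 255)^[count.toNat] (val, carry)) set_flag_o]
    · simp only [flags_rcl, flags_rcl_alt, if_neg h16, if_neg h8, pvFoldConst, pvRangeLen]
      rw [show (128:Int) = 2^7 from by norm_num, show (65536:Int) = 2^16 from by norm_num,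
        pvSpinIter 7 16, show ((2:Int)^16 - 1) = 65535 from by norm_num,
        show ((2:Int)^7) = 128 from by norm_num, pvStepAB]
      have hs := pvLoopEq 128 65535 9 (by norm_num) (fun s k hk => pvPerW s k hk)
        count (val, carry)
      push_cast at hs
      rw [← hs, hmask set_flag_o,
        pvTail 7 128 (by norm_num) ((pvStepB 128 65535)^[count.toNat] (val, carry)) set_flag_o]

-- ===== VERDICT (by name: the statement is the Claim_ definition above) =====
theorem flags_rcl_spec : Claim_equal_flags_rcl := by
  intro val count carry width set_flag_o _
  unfold Spec_flags_rcl
  exact pvSpec val count carry width set_flag_o
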